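-- pv_equiv track=rewrite | github.com/xwjim/arxiv-vla-daily | build_vla_pretraining_report.py | top_matching_paragraphs
-- ===== SOURCE A (Python) =====
-- def top_matching_paragraphs(paragraphs: list[str], keywords: list[str], limit: int = 3) -> list[str]:
--     scored: list[tuple[int, int, str]] = []
--     for paragraph in paragraphs:
--         lower = paragraph.lower()
--         score = sum(lower.count(keyword.lower()) for keyword in keywords)
--         if score:
--             length_penalty = abs(len(paragraph) - 260)
--             scored.append((score, -length_penalty, paragraph))
--     scored.sort(reverse=True)
--     results: list[str] = []
--     for _, _, paragraph in scored:
--         if paragraph not in results: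
--             results.append(paragraph)
--         if len(results) >= limit:
--             break
--     return results
-- ===== SOURCE B (Python) =====
-- def top_matching_paragraphs(paragraphs: list[str], keywords: list[str], limit: int = 3) -> list[str]:
--     scored: list[tuple[int, int, str]] = []
--     for paragraph in paragraphs:
--         lower = paragraph.lower()
--         score = sum(lower.count(keyword.lower()) for keyword in keywords)
--         if score:
--             scored.append((score, -abs(len(paragraph) - 260), paragraph))
--     results: list[str] = []
--     chosen: set[str] = set()
--     for _ in range(len(scored)):
--         best = None
--         for t in scored:
--             if t[2] not in chosen and (best is None or best < t):
--                 best = t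
--         if best is None:
--             break
--         results.append(best[2])
--         chosen.add(best[2])
--         if len(results) >= limit:
--             break
--     return results
-- ===== Notes on version B (the rewrite author's own statement) =====
-- stated objective: alternative
-- what changed: The sort(reverse=True) followed by a dedup walk is replaced by repeated top-1 selection: each round scans the scored tuples for the maximum whose paragraph is not yet chosen (tracked in a set), stopping when limit is reached or no eligible tuple remains.
import Mathlib
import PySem

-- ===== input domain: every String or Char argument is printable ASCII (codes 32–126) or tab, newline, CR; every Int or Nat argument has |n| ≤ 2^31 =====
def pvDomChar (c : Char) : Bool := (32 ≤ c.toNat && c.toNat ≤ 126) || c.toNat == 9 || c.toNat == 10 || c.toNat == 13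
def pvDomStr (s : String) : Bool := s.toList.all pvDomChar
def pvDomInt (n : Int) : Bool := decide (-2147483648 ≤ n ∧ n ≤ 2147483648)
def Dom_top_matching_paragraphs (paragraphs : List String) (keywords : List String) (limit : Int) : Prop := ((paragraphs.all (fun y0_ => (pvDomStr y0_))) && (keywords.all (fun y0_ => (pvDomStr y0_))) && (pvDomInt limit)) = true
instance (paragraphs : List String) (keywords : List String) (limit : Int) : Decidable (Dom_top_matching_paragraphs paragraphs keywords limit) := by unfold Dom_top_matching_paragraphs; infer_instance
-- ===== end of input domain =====

-- B replaces A's sort(reverse=True)-then-dedup-walk by repeated top-1 selection over the scored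
-- tuples (a different selection strategy of similar cost; objective: alternative).

-- ===== PORT A =====
-- Python's tuple order on (score, -penalty, paragraph) as a sort key (lexicographic)
def pvKey (t : Int × Int × String) : Int ×ₗ Int ×ₗ String := toLex (t.1, toLex (t.2.1, t.2.2))

-- score = sum(lower.count(keyword.lower()) for keyword in keywords)  (shared by A and B, whose
-- scoring loops are textually identical in Python)
def pvScore (keywords : List String) (paragraph : String) : Int :=
  let lower := PySem.Str.lower paragraph
  (keywords.map (fun keyword => (PySem.Str.count lower (PySem.Str.lower keyword) : Int))).sum

-- the loop building `scored` (identical in A and B)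
def pvScored (paragraphs : List String) (keywords : List String) : List (Int × Int × String) :=
  paragraphs.foldl (fun scored paragraph =>
    let score := pvScore keywords paragraph
    if score ≠ 0 then
      scored ++ [(score, -|PySem.Str.len paragraph - 260|, paragraph)]
    else scored) []

-- A's walk over the sorted list: append unseen paragraph, break once len(results) >= limit
def pvWalk : List (Int × Int × String) → List String → Int → List String
  | [], results, _ => results
  | t :: rest, results, limit =>
    let results' := if results.contains t.2.2 then results else results ++ [t.2.2]
    if limit ≤ (results'.length : Int) then results' else pvWalk rest results' limit

def top_matching_paragraphs (paragraphs : List String) (keywords : List String) (limit : Int) : List String :=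
  pvWalk (PySem.List.sorted (pvScored paragraphs keywords) pvKey true) [] limit

-- ===== PORT B =====
-- body of B's inner loop: `if t[2] not in chosen and (best is None or best < t): best = t`
def pvScanStep (chosen : PySem.Set String) (best : Option (Int × Int × String)) (t : Int × Int × String) : Option (Int × Int × String) :=
  if PySem.Set.contains chosen t.2.2 then best
  else match best with
    | none => some t
    | some b => if pvKey b < pvKey t then some t else some b

-- B's inner scan: maximum scored tuple (Python tuple order) whose paragraph is not yet chosen
def pvBestScan : List (Int × Int × String) → PySem.Set String → Option (Int × Int × String) → Option (Int × Int × String)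
  | [], _, best => best
  | t :: rest, chosen, best => pvBestScan rest chosen (pvScanStep chosen best t)

-- B's outer loop: `for _ in range(len(scored))`, break on no eligible tuple or on reaching limit
def pvSelect : Nat → List (Int × Int × String) → PySem.Set String → List String → Int → List String
  | 0, _, _, results, _ => results
  | fuel + 1, scored, chosen, results, limit =>
    match pvBestScan scored chosen none with
    | none => results
    | some t =>
      let results' := results ++ [t.2.2]
      let chosen' := PySem.Set.add chosen t.2.2
      if limit ≤ (results'.length : Int) then results' else pvSelect fuel scored chosen' results' limit

def top_matching_paragraphs_alt (paragraphs : List String) (keywords : List String) (limit : Int) : List String :=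
  let scored := pvScored paragraphs keywords
  pvSelect scored.length scored PySem.Set.empty [] limit

-- ===== PRECONDITION & SPEC =====
def Spec_top_matching_paragraphs (paragraphs : List String) (keywords : List String) (limit : Int) (out : List String) : Prop := out = top_matching_paragraphs_alt paragraphs keywords limit
instance (paragraphs : List String) (keywords : List String) (limit : Int) (out : List String) : Decidable (Spec_top_matching_paragraphs paragraphs keywords limit out) := by unfold Spec_top_matching_paragraphs; infer_instance

-- ===== CLAIM (what is proved, stated in full; the proofs are below) =====
def Claim_equal_top_matching_paragraphs : Prop := ∀ (paragraphs : List String) (keywords : List String) (limit : Int), Dom_top_matching_paragraphs paragraphs keywords limit → Spec_top_matching_paragraphs paragraphs keywords limit (top_matching_paragraphs paragraphs keywords limit)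

-- ===== LEMMAS AND PROOFS =====

lemma pvKey_inj : Function.Injective pvKey := by
  rintro ⟨a1, a2, a3⟩ ⟨b1, b2, b3⟩ h
  simp only [pvKey, toLex_inj, Prod.mk.injEq] at h
  simp [h.1, h.2.1, h.2.2]

-- "r is the maximum (under pvKey) of the elements satisfying P, or none if there are none"
def pvIsMax (P : (Int × Int × String) → Prop) : Option (Int × Int × String) → Prop
  | none => ∀ x, ¬ P x
  | some m => P m ∧ ∀ x, P x → pvKey x ≤ pvKey m

lemma pvIsMax_congr {P Q : (Int × Int × String) → Prop} (h : ∀ x, P x ↔ Q x)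
    {r : Option (Int × Int × String)} (hr : pvIsMax P r) : pvIsMax Q r := by
  cases r with
  | none => intro x hx; exact hr x ((h x).mpr hx)
  | some m => exact ⟨(h m).mp hr.1, fun x hx => hr.2 x ((h x).mpr hx)⟩

lemma pvScanStep_isMax {Q : (Int × Int × String) → Prop} {b : Option (Int × Int × String)}
    (chosen : PySem.Set String) (t : Int × Int × String) (hb : pvIsMax Q b) :
    pvIsMax (fun x => Q x ∨ (x = t ∧ PySem.Set.contains chosen x.2.2 = false)) (pvScanStep chosen b t) := by
  by_cases hc : PySem.Set.contains chosen t.2.2 = true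
  · unfold pvScanStep
    rw [if_pos hc]
    refine pvIsMax_congr (fun x => ⟨Or.inl, ?_⟩) hb
    rintro (h | ⟨rfl, h⟩)
    · exact h
    · rw [hc] at h; exact absurd h (by simp)
  · rw [Bool.not_eq_true] at hc
    unfold pvScanStep
    rw [hc, if_neg (by simp)]
    cases b with
    | none =>
      exact ⟨Or.inr ⟨rfl, hc⟩, fun x hx => by
        rcases hx with h | ⟨rfl, _⟩
        · exact absurd h (hb x)
        · exact le_refl _⟩
    | some m =>
      by_cases hlt : pvKey m < pvKey t
      · simp only [hlt, if_true]
        refine ⟨Or.inr ⟨rfl, hc⟩, fun x hx => ?_⟩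
        rcases hx with h | ⟨rfl, _⟩
        · exact le_of_lt (lt_of_le_of_lt (hb.2 x h) hlt)
        · exact le_refl _
      · simp only [hlt, if_false]
        refine ⟨Or.inl hb.1, fun x hx => ?_⟩
        rcases hx with h | ⟨rfl, _⟩
        · exact hb.2 x h
        · exact not_lt.mp hlt

lemma pvBestScan_spec (l : List (Int × Int × String)) (chosen : PySem.Set String) :
    ∀ (b : Option (Int × Int × String)) (Q : (Int × Int × String) → Prop), pvIsMax Q b →
    pvIsMax (fun x => Q x ∨ (x ∈ l ∧ PySem.Set.contains chosen x.2.2 = false)) (pvBestScan l chosen b) := by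
  induction l with
  | nil =>
    intro b Q hb
    refine pvIsMax_congr (fun x => ?_) hb
    simp
  | cons t rest ih =>
    intro b Q hb
    rw [pvBestScan]
    refine pvIsMax_congr (fun x => ?_) (ih _ _ (pvScanStep_isMax chosen t hb))
    simp only [List.mem_cons]
    tauto

lemma pvBestScan_isMax (l : List (Int × Int × String)) (chosen : PySem.Set String) :
    pvIsMax (fun x => x ∈ l ∧ PySem.Set.contains chosen x.2.2 = false) (pvBestScan l chosen none) := by
  refine pvIsMax_congr (fun x => by tauto) (pvBestScan_spec l chosen none (fun _ => False) ?_)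
  intro x hx
  exact hx

lemma pvWalk_all_skip (sl : List (Int × Int × String)) (res : List String) (limit : Int)
    (h : ∀ t ∈ sl, res.contains t.2.2 = true) : pvWalk sl res limit = res := by
  induction sl with
  | nil => rfl
  | cons t rest ih =>
    rw [pvWalk]
    simp only [h t (List.mem_cons_self ..), if_true]
    split
    · rfl
    · exact ih (fun x hx => h x (List.mem_cons_of_mem _ hx))

lemma pvWalk_dropWhile (sl : List (Int × Int × String)) (res : List String) (limit : Int)
    (hres : (res.length : Int) < limit ∨ res = []) :
    pvWalk sl res limit = pvWalk (sl.dropWhile (fun t => res.contains t.2.2)) res limit := by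
  induction sl with
  | nil => rfl
  | cons t rest ih =>
    by_cases hc : res.contains t.2.2 = true
    · rw [List.dropWhile_cons_of_pos (by simpa using hc), ← ih, pvWalk]
      simp only [hc, if_true]
      rw [if_neg]
      rcases hres with h | rfl
      · omega
      · simp at hc
    · rw [List.dropWhile_cons_of_neg (by simpa using hc)]

lemma pvContains_false {res : List String} {s : String} : res.contains s = false ↔ s ∉ res := by
  simp [List.contains_eq_mem]

lemma pvSetContains_false {chosen : PySem.Set String} {s : String} :
    PySem.Set.contains chosen s = false ↔ s ∉ chosen := by
  simp [PySem.Set.contains_eq_listContains, List.contains_eq_mem]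

lemma pvMain : ∀ (fuel : Nat) (sl l : List (Int × Int × String)) (chosen : PySem.Set String)
    (res : List String) (limit : Int),
    sl.Pairwise (fun a b => pvKey b ≤ pvKey a) →
    (∀ p : String, PySem.Set.contains chosen p = res.contains p) →
    (∀ t : Int × Int × String, res.contains t.2.2 = false → (t ∈ sl ↔ t ∈ l)) →
    (l.filter (fun t => !(res.contains t.2.2))).length ≤ fuel →
    ((res.length : Int) < limit ∨ res = []) →
    pvWalk sl res limit = pvSelect fuel l chosen res limit := by
  intro fuel
  induction fuel with
  | zero =>
    intro sl l chosen res limit hsort hch hmem hfuel hres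
    have hfil : l.filter (fun t => !(res.contains t.2.2)) = [] :=
      List.length_eq_zero_iff.mp (Nat.le_zero.mp hfuel)
    have hall : ∀ t ∈ sl, res.contains t.2.2 = true := by
      intro t ht
      by_contra hcon
      rw [Bool.not_eq_true] at hcon
      have h1 : t ∈ l := (hmem t hcon).mp ht
      have h2 : t ∈ l.filter (fun t => !(res.contains t.2.2)) :=
        List.mem_filter.mpr ⟨h1, by simp [pvContains_false.mp hcon]⟩
      rw [hfil] at h2
      simp at h2
    rw [pvWalk_all_skip _ _ _ hall]
    rfl
  | succ fuel ih =>
    intro sl l chosen res limit hsort hch hmem hfuel hres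
    have hspec := pvBestScan_isMax l chosen
    cases hd : sl.dropWhile (fun t => res.contains t.2.2) with
    | nil =>
      have hall : ∀ t ∈ sl, res.contains t.2.2 = true := by
        intro t ht
        have := List.dropWhile_eq_nil_iff.mp hd
        simpa using this t ht
      have hnone : pvBestScan l chosen none = none := by
        cases hbs : pvBestScan l chosen none with
        | none => rfl
        | some m =>
          rw [hbs] at hspec
          obtain ⟨⟨hml, hmc⟩, -⟩ := hspec
          rw [hch] at hmc
          have hmsl : m ∈ sl := (hmem m hmc).mpr hml
          rw [hall m hmsl] at hmc
          cases hmc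
      rw [pvWalk_all_skip _ _ _ hall, pvSelect, hnone]
    | cons m tl =>
      have hpredm : res.contains m.2.2 = false := by
        have h1 : sl.dropWhile (fun t => res.contains t.2.2) ≠ [] := by rw [ne_eq, hd]; simp
        have h2 := List.head_dropWhile_not (l := sl) (p := fun t => res.contains t.2.2) h1
        simp only [hd, List.head_cons] at h2
        exact h2
      have hdecomp : sl.takeWhile (fun t => res.contains t.2.2) ++ m :: tl = sl := by
        rw [← hd]; exact List.takeWhile_append_dropWhile
      have hmsl : m ∈ sl := by rw [← hdecomp]; simp
      have hml : m ∈ l := (hmem m hpredm).mp hmsl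
      have hPm : m ∈ l ∧ PySem.Set.contains chosen m.2.2 = false := ⟨hml, by rw [hch]; exact hpredm⟩
      have hpair := hdecomp ▸ hsort
      rw [List.pairwise_append] at hpair
      have htlle : ∀ x ∈ tl, pvKey x ≤ pvKey m := by
        have := hpair.2.1
        rw [List.pairwise_cons] at this
        exact this.1
      have hmax : ∀ x, x ∈ l → PySem.Set.contains chosen x.2.2 = false → pvKey x ≤ pvKey m := by
        intro x hxl hxc
        rw [hch] at hxc
        have hxsl : x ∈ sl := (hmem x hxc).mpr hxl
        rw [← hdecomp] at hxsl
        rcases List.mem_append.mp hxsl with hx | hx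
        · have := List.mem_takeWhile_imp hx
          rw [hxc] at this
          cases this
        · rcases List.mem_cons.mp hx with rfl | hx
          · exact le_refl _
          · exact htlle x hx
      have hbest : pvBestScan l chosen none = some m := by
        cases hbs : pvBestScan l chosen none with
        | none =>
          rw [hbs] at hspec
          exact absurd hPm (hspec m)
        | some m' =>
          rw [hbs] at hspec
          have : m' = m := pvKey_inj (le_antisymm (hmax m' hspec.1.1 hspec.1.2) (hspec.2 m hPm))
          rw [this]
      rw [pvWalk_dropWhile sl res limit hres, hd, pvWalk, pvSelect, hbest]
      simp only [hpredm, Bool.false_eq_true, if_false]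
      by_cases hlim : limit ≤ ((res ++ [m.2.2]).length : Int)
      · simp only [hlim, if_true]
      · simp only [hlim, if_false]
        -- preservation of the invariants for the recursive call
        have hsub : tl.Sublist sl := by
          rw [← hdecomp]
          exact (List.sublist_cons_self m tl).trans (List.sublist_append_right _ _)
        have hchosenadd : PySem.Set.add chosen m.2.2 = chosen ++ [m.2.2] := by
          have hnm : m.2.2 ∉ chosen := pvSetContains_false.mp hPm.2
          simp [PySem.Set.add, hnm]
        have hchm : ∀ p : String, p ∈ chosen ↔ p ∈ res := by
          intro p
          have h0 := hch p
          simpa [PySem.Set.contains_eq_listContains, List.contains_eq_mem, decide_eq_decide] using h0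
        have hch' : ∀ p : String, PySem.Set.contains (PySem.Set.add chosen m.2.2) p = (res ++ [m.2.2]).contains p := by
          intro p
          rw [hchosenadd]
          simp only [PySem.Set.contains_eq_listContains, List.contains_eq_mem, decide_eq_decide,
            List.mem_append]
          rw [hchm p]
        have hres' : ∀ t : Int × Int × String, (res ++ [m.2.2]).contains t.2.2 = false →
            res.contains t.2.2 = false ∧ t.2.2 ≠ m.2.2 := by
          intro t ht
          rw [pvContains_false] at ht
          simp only [List.mem_append, not_or, List.mem_singleton] at ht
          exact ⟨pvContains_false.mpr ht.1, ht.2⟩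
        have hmem' : ∀ t : Int × Int × String, (res ++ [m.2.2]).contains t.2.2 = false → (t ∈ tl ↔ t ∈ l) := by
          intro t ht
          obtain ⟨ht1, ht2⟩ := hres' t ht
          constructor
          · intro htl
            exact (hmem t ht1).mp (hsub.mem htl)
          · intro htll
            have hts : t ∈ sl := (hmem t ht1).mpr htll
            rw [← hdecomp] at hts
            rcases List.mem_append.mp hts with hx | hx
            · have := List.mem_takeWhile_imp hx
              rw [ht1] at this
              cases this
            · rcases List.mem_cons.mp hx with rfl | hx
              · exact absurd rfl ht2
              · exact hx
        have hfuel' : (l.filter (fun t => !((res ++ [m.2.2]).contains t.2.2))).length ≤ fuel := by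
          have heq : l.filter (fun t => !((res ++ [m.2.2]).contains t.2.2)) =
              (l.filter (fun t => !(res.contains t.2.2))).filter (fun t => !((res ++ [m.2.2]).contains t.2.2)) := by
            rw [List.filter_filter]
            apply List.filter_congr
            intro x _
            by_cases h1 : x.2.2 ∈ res <;> by_cases h2 : x.2.2 = m.2.2 <;>
              simp [List.contains_eq_mem, h1, h2]
          have hlt : ((l.filter (fun t => !(res.contains t.2.2))).filter
              (fun t => !((res ++ [m.2.2]).contains t.2.2))).length <
              (l.filter (fun t => !(res.contains t.2.2))).length := by
            apply List.length_filter_lt_length_iff_exists.mpr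
            refine ⟨m, List.mem_filter.mpr ⟨hml, by simp [pvContains_false.mp hpredm]⟩, ?_⟩
            simp [List.contains_eq_mem]
          rw [heq]
          omega
        have hreslim : (((res ++ [m.2.2]).length : Int) < limit) ∨ (res ++ [m.2.2]) = [] := by
          left
          omega
        exact ih tl l (PySem.Set.add chosen m.2.2) (res ++ [m.2.2]) limit
          (hsort.sublist hsub) hch' hmem' hfuel' hreslim

-- ===== VERDICT (by name: the statement is the Claim_ definition above) =====
theorem top_matching_paragraphs_spec : Claim_equal_top_matching_paragraphs := by
  intro paragraphs keywords limit _
  unfold Spec_top_matching_paragraphs top_matching_paragraphs top_matching_paragraphs_alt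
  exact pvMain (pvScored paragraphs keywords).length _ _ _ _ _
    (PySem.List.sorted_pairwise_rev _ _)
    (fun p => rfl)
    (fun t _ => PySem.List.mem_sorted _ _ _ _)
    (List.length_filter_le _ _)
    (Or.inr rfl)
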